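-- pv_equiv track=rewrite | github.com/verso-/Python-programs | bagels.py | hints
-- ===== SOURCE A (Python) =====
-- def hints(guess,target):
--     #returns string with fermi, pico, and bagels hints
--     if guess==target:
--         return 'You got it!'
--
--     hint=[]
--
--     for i in range(len(guess)):
--         if guess[i]==target[i]:
--             hint.append('Fermi')
--         elif guess[i] in target:
--             hint.append('Pico')
--
--     if len(hint)==0:
--         return 'Bagels'
--
--     hint.sort()
--     return ''.join(hint)
-- ===== SOURCE B (Python) =====
-- def hints(guess, target):
--     # staged passes over zipped pairs; output built by string repetition
--     if guess == target:
--         return 'You got it!'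
--     pairs = list(zip(guess, target))
--     fermi = sum(1 for g, t in pairs if g == t)
--     pico = sum(1 for g, t in pairs if g != t and g in target)
--     if fermi == 0 and pico == 0:
--         return 'Bagels'
--     return 'Fermi' * fermi + 'Pico' * pico
-- ===== Notes on version B (the rewrite author's own statement) =====
-- stated objective: alternative
-- what changed: B drops A's index loop that appends hint words and sorts them: it zips guess with target, takes two staged counting passes (Fermi matches, then Pico matches) over the pairs, and rebuilds the answer by string repetition 'Fermi'*fermi + 'Pico'*pico, which equals A's sorted join because 'Fermi' sorts before 'Pico'.
import Mathlib
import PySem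

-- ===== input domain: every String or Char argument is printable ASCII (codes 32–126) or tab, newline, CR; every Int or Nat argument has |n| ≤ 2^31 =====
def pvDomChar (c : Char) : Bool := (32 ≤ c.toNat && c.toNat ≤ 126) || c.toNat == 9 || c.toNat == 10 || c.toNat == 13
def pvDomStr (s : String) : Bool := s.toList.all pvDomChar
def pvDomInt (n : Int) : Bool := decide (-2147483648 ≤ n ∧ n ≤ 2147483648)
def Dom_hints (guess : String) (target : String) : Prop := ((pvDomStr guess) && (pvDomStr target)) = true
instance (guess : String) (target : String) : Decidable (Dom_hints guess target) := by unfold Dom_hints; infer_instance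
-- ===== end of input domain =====

-- B zips guess with target, counts Fermi/Pico matches in two staged passes and rebuilds the
-- answer by string repetition instead of A's index loop with a sorted-and-joined hint list.

-- ===== PORT A =====
def hints (guess : String) (target : String) : String :=
  if guess == target then "You got it!" else
  let g := guess.toList
  let t := target.toList
  let hint : List String :=
    (PySem.List.pyRange 0 (g.length : Int) 1).foldl (fun acc i =>
      if PySem.List.pyGetD g i ' ' == PySem.List.pyGetD t i ' ' then acc ++ ["Fermi"]
      else if t.contains (PySem.List.pyGetD g i ' ') then acc ++ ["Pico"]
      else acc) []
  if hint.length == 0 then "Bagels"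
  else PySem.Str.join "" (PySem.List.sorted hint (fun s => s) false)

-- ===== PORT B =====
def hints_alt (guess : String) (target : String) : String :=
  if guess == target then "You got it!" else
  let pairs := guess.toList.zip target.toList
  let fermi := pairs.countP (fun p => p.1 == p.2)
  let pico := pairs.countP (fun p => !(p.1 == p.2) && target.toList.contains p.1)
  if fermi == 0 && pico == 0 then "Bagels"
  else PySem.Str.join "" (List.replicate fermi "Fermi" ++ List.replicate pico "Pico")

-- ===== PRECONDITION & SPEC =====
-- A raises IndexError when the guess is longer than the target and not equal to it:
-- those inputs are excluded; nothing else is.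
def Pre_hints (guess : String) (target : String) : Prop :=
  guess = target ∨ guess.toList.length ≤ target.toList.length
instance (guess : String) (target : String) : Decidable (Pre_hints guess target) := by
  unfold Pre_hints; infer_instance
def pvWitness_hints : String × String := ("12", "13")

def Spec_hints (guess : String) (target : String) (out : String) : Prop := out = hints_alt guess target
instance (guess : String) (target : String) (out : String) : Decidable (Spec_hints guess target out) := by unfold Spec_hints; infer_instance

-- ===== CLAIM (what is proved, stated in full; the proofs are below) =====
def Claim_equal_hints : Prop := ∀ (guess : String) (target : String), Dom_hints guess target → Pre_hints guess target → Spec_hints guess target (hints guess target)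

-- ===== LEMMAS AND PROOFS =====

-- the contribution of position (g-char, t-char) to A's hint list, with the full target fixed
def pvDelta (t : List Char) (p : Char × Char) : List String :=
  if p.1 == p.2 then ["Fermi"]
  else if t.contains p.1 then ["Pico"]
  else []

theorem foldA_eq_flatMap (g t : List Char) (is : List Int) (acc : List String) :
    is.foldl (fun acc i =>
      if PySem.List.pyGetD g i ' ' == PySem.List.pyGetD t i ' ' then acc ++ ["Fermi"]
      else if t.contains (PySem.List.pyGetD g i ' ') then acc ++ ["Pico"]
      else acc) acc
    = acc ++ is.flatMap (fun i => pvDelta t (PySem.List.pyGetD g i ' ', PySem.List.pyGetD t i ' ')) := by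
  induction is generalizing acc with
  | nil => simp
  | cons i is ih =>
    simp only [List.foldl_cons, List.flatMap_cons, ih, pvDelta]
    split_ifs <;> simp

-- A's range-indexed flatMap equals the same flatMap over the zipped character lists
theorem flatMap_range_eq_zip (T : List Char) (g : List Char) :
    ∀ (t : List Char), g.length ≤ t.length →
    (List.range g.length).flatMap (fun k => pvDelta T (g.getD k ' ', t.getD k ' '))
    = (g.zip t).flatMap (fun p => pvDelta T p) := by
  induction g with
  | nil => simp
  | cons a g ih =>
    intro t hlen
    match t with
    | [] => simp at hlen
    | b :: t' =>
      simp only [List.length_cons, List.range_succ_eq_map, List.flatMap_cons, List.flatMap_map,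
        List.getD_cons_zero, List.getD_cons_succ, List.zip_cons_cons]
      simp only [List.length_cons] at hlen
      rw [ih t' (by omega)]

theorem count_flatMap_fermi (t : List Char) (pairs : List (Char × Char)) :
    ((pairs.flatMap (pvDelta t)).count "Fermi") = pairs.countP (fun p => p.1 == p.2) := by
  induction pairs with
  | nil => simp
  | cons p ps ih =>
    simp only [List.flatMap_cons, List.count_append, List.countP_cons, ih, pvDelta]
    split_ifs with h1 h2 <;> simp_all
    omega

theorem count_flatMap_pico (t : List Char) (pairs : List (Char × Char)) :
    ((pairs.flatMap (pvDelta t)).count "Pico") = pairs.countP (fun p => !(p.1 == p.2) && t.contains p.1) := by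
  induction pairs with
  | nil => simp
  | cons p ps ih =>
    simp only [List.flatMap_cons, List.count_append, List.countP_cons, ih, pvDelta]
    split_ifs with h1 h2 <;> simp_all
    omega

theorem mem_flatMap_delta (t : List Char) (pairs : List (Char × Char)) (x : String)
    (hx : x ∈ pairs.flatMap (pvDelta t)) : x = "Fermi" ∨ x = "Pico" := by
  simp only [List.mem_flatMap] at hx
  obtain ⟨p, _, hp⟩ := hx
  unfold pvDelta at hp
  split_ifs at hp <;> simp_all

theorem count_eq_length (l : List String)
    (h : ∀ x ∈ l, x = "Fermi" ∨ x = "Pico") :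
    l.count "Fermi" + l.count "Pico" = l.length := by
  induction l with
  | nil => simp
  | cons a l ih =>
    have ha := h a (by simp)
    have := ih (fun x hx => h x (by simp [hx]))
    rcases ha with h' | h' <;> subst h' <;>
      simp [this.symm] <;> omega

theorem sorted_fp (l : List String)
    (h : ∀ x ∈ l, x = "Fermi" ∨ x = "Pico") :
    PySem.List.sorted l (fun s => s) false
      = List.replicate (l.count "Fermi") "Fermi" ++ List.replicate (l.count "Pico") "Pico" := by
  apply PySem.List.sorted_id_eq_of_perm_of_pairwise
  · rw [List.perm_iff_count]
    intro a
    by_cases hF : a = "Fermi"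
    · subst hF; simp [List.count_replicate]
    · by_cases hP : a = "Pico"
      · subst hP; simp [List.count_replicate]
      · have : a ∉ l := fun hm => by rcases h a hm with h' | h' <;> simp_all
        have h0 := List.count_eq_zero.mpr this
        simp only [List.count_append, List.count_replicate, h0]
        rw [if_neg (by simp [beq_iff_eq]; exact fun h' => hF h'.symm),
            if_neg (by simp [beq_iff_eq]; exact fun h' => hP h'.symm)]
  · apply List.pairwise_append.mpr
    refine ⟨List.pairwise_replicate.mpr (Or.inr le_rfl),
            List.pairwise_replicate.mpr (Or.inr le_rfl), ?_⟩
    intro a ha b hb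
    rw [List.eq_of_mem_replicate ha, List.eq_of_mem_replicate hb]
    exact le_of_lt (String.lt_iff_toList_lt.mpr (by decide))

-- ===== VERDICT (by name: the statement is the Claim_ definition above) =====
theorem hints_spec : Claim_equal_hints := by
  intro guess target _ hpre
  unfold Spec_hints hints hints_alt
  by_cases heq : guess == target
  · simp [heq]
  · have hne : guess ≠ target := by simpa using heq
    have hlen : guess.toList.length ≤ target.toList.length := by
      rcases hpre with h | h
      · exact absurd h hne
      · exact h
    simp only [heq, Bool.false_eq_true, if_false]
    set g := guess.toList
    set t := target.toList
    rw [foldA_eq_flatMap g t _ []]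
    have hrange : (PySem.List.pyRange 0 (g.length : Int) 1).flatMap
        (fun i => pvDelta t (PySem.List.pyGetD g i ' ', PySem.List.pyGetD t i ' '))
        = (List.range g.length).flatMap (fun k => pvDelta t (g.getD k ' ', t.getD k ' ')) := by
      rw [PySem.List.pyRange_one, List.flatMap_map]
      simp [PySem.List.pyGetD_natCast]
    rw [hrange, flatMap_range_eq_zip t g t hlen]
    set l := (g.zip t).flatMap (fun p => pvDelta t p) with hl
    have hmem : ∀ x ∈ l, x = "Fermi" ∨ x = "Pico" := fun x hx => mem_flatMap_delta t _ x hx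
    have hF : l.count "Fermi" = (g.zip t).countP (fun p => p.1 == p.2) := count_flatMap_fermi t _
    have hP : l.count "Pico" = (g.zip t).countP (fun p => !(p.1 == p.2) && t.contains p.1) :=
      count_flatMap_pico t _
    have hcl := count_eq_length l hmem
    simp only [List.nil_append]
    by_cases hz : l.length = 0
    · have h0 : (g.zip t).countP (fun p => p.1 == p.2) = 0 ∧
          (g.zip t).countP (fun p => !(p.1 == p.2) && t.contains p.1) = 0 := by
        constructor <;> omega
      simp only [hz, h0.1, h0.2]
      simp
    · have hnz : ¬((g.zip t).countP (fun p => p.1 == p.2) == 0 &&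
          (g.zip t).countP (fun p => !(p.1 == p.2) && t.contains p.1) == 0) = true := by
        simp only [Bool.and_eq_true, beq_iff_eq]
        intro hc
        omega
      simp only [hz, hnz, if_false, beq_iff_eq]
      rw [sorted_fp l hmem, hF, hP]
      simp
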